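-- pv_equiv track=rewrite | github.com/MrBrantCode/unitest_baseline | mut_generate/mist_train_cf/cf_101529/solution.py | group_and_sort_words
-- ===== SOURCE A (Python) =====
-- from collections import defaultdict
--
-- def group_and_sort_words(words):
--     """
--     This function takes a list of words as input, groups them by their first letter,
--     and returns a sorted list of tuples. Each tuple contains the group letter,
--     the frequency count of the group, and the list of words in the group.
--     The output is sorted first by group frequency in descending order and then
--     by the last character of the group letter in ascending order.
--
--     Args:
--     words (list): A list of words.
--
--     Returns:
--     list: A sorted list of tuples containing the group letter, frequency count,
--           and the list of words in the group.
--     """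
--
--     # Group the words by their first letter
--     groups = defaultdict(list)
--     for word in words:
--         groups[word[0]].append(word)
--
--     # Count the number of words in each group
--     group_freq = {}
--     for group, words in groups.items():
--         group_freq[group] = len(words)
--
--     # Sort the groups by frequency and last character of the group letter
--     sorted_groups = sorted(groups.items(), key=lambda x: (-group_freq[x[0]], x[0][-1]))
--
--     # Return a list of tuples containing the group letter, frequency count, and words
--     return [(group, group_freq[group], words) for group, words in sorted_groups]
-- ===== SOURCE B (Python) =====
-- def group_and_sort_words(words):
--     # Idiomatic dict-free rewrite: distinct first letters in first-seen order,
--     # one filter pass per letter, then a single keyed sort of the ready tuples.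
--     letters = list(dict.fromkeys(word[0] for word in words))
--     result = []
--     for letter in letters:
--         bucket = [word for word in words if word[0] == letter]
--         result.append((letter, len(bucket), bucket))
--     result.sort(key=lambda t: (-t[1], t[0]))
--     return result
-- ===== Notes on version B (the rewrite author's own statement) =====
-- stated objective: simpler
-- what changed: B drops both dicts (the defaultdict bucketing and the separate frequency dict): it takes the distinct first letters in first-seen order via dict.fromkeys, builds each group with one filter pass per letter using len directly, and sorts the finished tuples once by (-count, letter).
import Mathlib
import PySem

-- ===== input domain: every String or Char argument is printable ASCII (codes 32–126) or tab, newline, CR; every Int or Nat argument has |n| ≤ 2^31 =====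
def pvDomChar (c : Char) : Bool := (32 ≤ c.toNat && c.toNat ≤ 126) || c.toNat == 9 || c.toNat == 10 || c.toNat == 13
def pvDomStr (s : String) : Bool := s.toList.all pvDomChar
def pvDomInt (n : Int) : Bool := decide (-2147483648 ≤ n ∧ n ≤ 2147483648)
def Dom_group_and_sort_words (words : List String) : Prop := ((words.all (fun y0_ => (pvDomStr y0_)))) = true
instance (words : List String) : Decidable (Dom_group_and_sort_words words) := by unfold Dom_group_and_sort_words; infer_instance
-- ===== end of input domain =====

-- B replaces A's defaultdict bucketing + separate freq dict by a dict-free pass: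
-- distinct first letters in order, one filter per letter, one keyed sort (objective: simpler).


-- ===== PORT A =====
-- word[0] as a 1-character string; the none branch is unreachable under Pre_ (Python raises IndexError on "")
def pvFirst (w : String) : String :=
  match PySem.Str.pyGet? w 0 with
  | some c => String.ofList [c]
  | none => ""

-- s[-1] as a 1-character string; the none branch is unreachable (dict keys are 1-character strings)
def pvLast (s : String) : String :=
  match PySem.Str.pyGet? s (-1) with
  | some c => String.ofList [c]
  | none => ""

def group_and_sort_words (words : List String) : List (String × Int × List String) :=
  let groups : PySem.Dict String (List String) :=
    words.foldl (fun d word => d.modify (pvFirst word) [] (fun g => g ++ [word])) PySem.Dict.empty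
  let group_freq : PySem.Dict String Int :=
    groups.items.foldl (fun d p => d.insert p.1 ((p.2.length : Int))) PySem.Dict.empty
  let sorted_groups :=
    PySem.List.sorted2 groups.items (fun x => -(group_freq.getD x.1 0)) (fun x => pvLast x.1) false
  sorted_groups.map (fun p => (p.1, group_freq.getD p.1 0, p.2))

-- ===== PORT B =====
def group_and_sort_words_alt (words : List String) : List (String × Int × List String) :=
  let letters := PySem.List.dedup (words.map pvFirst)
  let result := letters.map (fun letter =>
    let bucket := words.filter (fun word => pvFirst word == letter)
    (letter, (bucket.length : Int), bucket))
  PySem.List.sorted2 result (fun t => -t.2.1) (fun t => t.1) false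

-- ===== PRECONDITION & SPEC =====
-- Pre_ excludes lists containing the empty string, on which Python A raises IndexError (word[0]).
def Pre_group_and_sort_words (words : List String) : Prop := ∀ w ∈ words, w ≠ ""
instance (words : List String) : Decidable (Pre_group_and_sort_words words) := by unfold Pre_group_and_sort_words; infer_instance
def pvWitness_group_and_sort_words : List String := ["apple", "ant", "bat", "Zoo"]

def Spec_group_and_sort_words (words : List String) (out : List (String × Int × List String)) : Prop := out = group_and_sort_words_alt words
instance (words : List String) (out : List (String × Int × List String)) : Decidable (Spec_group_and_sort_words words out) := by unfold Spec_group_and_sort_words; infer_instance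

-- ===== CLAIM (what is proved, stated in full; the proofs are below) =====
def Claim_equal_group_and_sort_words : Prop := ∀ (words : List String), Dom_group_and_sort_words words → Pre_group_and_sort_words words → Spec_group_and_sort_words words (group_and_sort_words words)

-- ===== LEMMAS AND PROOFS =====

-- the buckets, as functions of the letter (proof-side only)
def pvGpair (words : List String) (c : String) : String × List String :=
  (c, words.filter (fun w => pvFirst w == c))

def pvGtrip (words : List String) (c : String) : String × Int × List String :=
  (c, ((words.filter (fun w => pvFirst w == c)).length : Int), words.filter (fun w => pvFirst w == c))

theorem pvInsertBy_congr {α : Type} (before before' : α → α → Bool) (x : α) (ys : List α)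
    (h : ∀ b ∈ ys, before x b = before' x b) :
    PySem.List.insertBy before x ys = PySem.List.insertBy before' x ys := by
  induction ys with
  | nil => rfl
  | cons y ys ih =>
    simp only [PySem.List.insertBy]
    rw [h y (by simp)]
    split
    · rfl
    · rw [ih (fun b hb => h b (by simp [hb]))]

theorem pvFoldl_insertBy_congr {α : Type} (before before' : α → α → Bool) (xs : List α) :
    ∀ acc : List α, (∀ a ∈ xs, ∀ b ∈ acc, before a b = before' a b) →
    (∀ a ∈ xs, ∀ b ∈ xs, before a b = before' a b) →
    xs.foldl (fun acc x => PySem.List.insertBy before x acc) acc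
      = xs.foldl (fun acc x => PySem.List.insertBy before' x acc) acc := by
  induction xs with
  | nil => intro acc _ _; rfl
  | cons x xs ih =>
    intro acc hacc hxs
    simp only [List.foldl_cons]
    rw [pvInsertBy_congr before before' x acc (hacc x (by simp))]
    exact ih _
      (fun a ha b hb => by
        rcases (PySem.List.mem_insertBy before' x b acc).1 hb with rfl | hb
        · exact hxs a (by simp [ha]) b (by simp)
        · exact hacc a (by simp [ha]) b hb)
      (fun a ha b hb => hxs a (by simp [ha]) b (by simp [hb]))

theorem pvInsertBy_map {α β : Type} (f : α → β) (before : β → β → Bool) (x : α) (ys : List α) :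
    PySem.List.insertBy before (f x) (ys.map f)
      = (PySem.List.insertBy (fun a b => before (f a) (f b)) x ys).map f := by
  induction ys with
  | nil => rfl
  | cons y ys ih =>
    simp only [List.map_cons, PySem.List.insertBy]
    split
    · simp
    · simp [ih]

theorem pvFoldl_insertBy_map {α β : Type} (f : α → β) (before : β → β → Bool) (xs : List α) :
    ∀ acc : List α,
    (xs.map f).foldl (fun acc y => PySem.List.insertBy before y acc) (acc.map f)
      = (xs.foldl (fun acc x => PySem.List.insertBy (fun a b => before (f a) (f b)) x acc) acc).map f := by
  induction xs with
  | nil => intro acc; rfl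
  | cons x xs ih =>
    intro acc
    simp only [List.map_cons, List.foldl_cons]
    rw [pvInsertBy_map f before x acc, ih]

theorem pvSorted2_map {α β κ₁ κ₂ : Type} [LT κ₁] [DecidableLT κ₁] [LT κ₂] [DecidableLT κ₂]
    (f : α → β) (k1 : β → κ₁) (k2 : β → κ₂) (xs : List α) :
    PySem.List.sorted2 (xs.map f) k1 k2 false
      = (PySem.List.sorted2 xs (fun x => k1 (f x)) (fun x => k2 (f x)) false).map f := by
  simp only [PySem.List.sorted2, if_neg (by decide : ¬ (false = true))]
  simpa using pvFoldl_insertBy_map f _ xs []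

theorem pvSorted2_congr {α κ₁ κ₂ : Type} [LT κ₁] [DecidableLT κ₁] [LT κ₂] [DecidableLT κ₂]
    (k1 k1' : α → κ₁) (k2 k2' : α → κ₂) (xs : List α)
    (h1 : ∀ a ∈ xs, k1 a = k1' a) (h2 : ∀ a ∈ xs, k2 a = k2' a) :
    PySem.List.sorted2 xs k1 k2 false = PySem.List.sorted2 xs k1' k2' false := by
  simp only [PySem.List.sorted2, if_neg (by decide : ¬ (false = true))]
  exact pvFoldl_insertBy_congr _ _ xs []
    (fun a _ b hb => by cases hb)
    (fun a ha b hb => by rw [h1 a ha, h1 b hb, h2 a ha, h2 b hb])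

theorem pvGroups_items (words : List String) :
    (words.foldl (fun d word => d.modify (pvFirst word) [] (fun g => g ++ [word]))
        (PySem.Dict.empty : PySem.Dict String (List String))).items
      = (PySem.Set.ofList (words.map pvFirst)).map (pvGpair words) := by
  set d := words.foldl (fun d word => d.modify (pvFirst word) [] (fun g => g ++ [word]))
      (PySem.Dict.empty : PySem.Dict String (List String)) with hd
  have hkeys : d.keys = PySem.Set.ofList (words.map pvFirst) := by
    rw [hd, PySem.Dict.keys_foldl_modify_key words pvFirst [] (fun _ w => fun g => g ++ [w]) PySem.Dict.empty,
        PySem.Dict.keys_empty, PySem.Set.ofList_eq_foldl]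
    rfl
  have hnd : d.keys.Nodup := by
    rw [hd]
    exact PySem.Dict.nodup_keys_foldl_modify_key words pvFirst [] (fun _ w => fun g => g ++ [w])
      PySem.Dict.empty (by rw [PySem.Dict.keys_empty]; exact List.nodup_nil)
  have hget : ∀ c, d.getD c [] = words.filter (fun w => pvFirst w == c) := by
    intro c
    have hmap : d = (words.map (fun w => (pvFirst w, w))).foldl
        (fun d p => d.modify p.1 [] (fun g => g ++ [p.2])) PySem.Dict.empty := by
      rw [hd, List.foldl_map]
    rw [hmap, PySem.Dict.getD_foldl_modify_append, PySem.Dict.getD_empty]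
    simp [List.filter_map, Function.comp_def]
  rw [PySem.Dict.items_eq_map_keys d hnd [], hkeys]
  exact List.map_congr_left (fun c _ => by rw [pvGpair, hget c])

theorem pvFreq_getD (words : List String) (c : String)
    (hc : c ∈ PySem.Set.ofList (words.map pvFirst)) :
    ((((PySem.Set.ofList (words.map pvFirst)).map (pvGpair words)).foldl
        (fun d p => d.insert p.1 ((p.2.length : Int))) PySem.Dict.empty)).getD c 0
      = ((words.filter (fun w => pvFirst w == c)).length : Int) := by
  set L := PySem.Set.ofList (words.map pvFirst) with hL
  have hfold : (L.map (pvGpair words)).foldl (fun d p => d.insert p.1 ((p.2.length : Int))) PySem.Dict.empty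
      = L.foldl (fun d c => d.insert c (((words.filter (fun w => pvFirst w == c)).length : Int))) PySem.Dict.empty := by
    rw [List.foldl_map]; rfl
  rw [hfold]
  have hitems : (L.foldl (fun d c => d.insert c (((words.filter (fun w => pvFirst w == c)).length : Int))) PySem.Dict.empty).items
      = L.map (fun c => (c, ((words.filter (fun w => pvFirst w == c)).length : Int))) := by
    have := PySem.Dict.items_foldl_insert_fresh (l := L) (k := fun c => c)
      (v := fun c => ((words.filter (fun w => pvFirst w == c)).length : Int))
      (d := PySem.Dict.empty) (fun a _ => PySem.Dict.contains_empty a)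
      (by simp [hL])
    simpa using this
  have hndk : (L.foldl (fun d c => d.insert c (((words.filter (fun w => pvFirst w == c)).length : Int))) PySem.Dict.empty).keys.Nodup := by
    simp only [PySem.Dict.keys, hitems, List.map_map]
    simp [hL, Function.comp_def]
  refine PySem.Dict.getD_of_mem_items _ ?_ hndk 0
  rw [hitems]
  exact List.mem_map.2 ⟨c, hc, rfl⟩

theorem pvLast_pvFirst (w : String) (hw : w ≠ "") : pvLast (pvFirst w) = pvFirst w := by
  have hne : w.toList ≠ [] := fun h => hw (by
    have := congrArg String.ofList h
    simpa using this)
  cases h : w.toList with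
  | nil => exact absurd h hne
  | cons ch t =>
    have h0 : PySem.Str.pyGet? w 0 = some ch := by
      have := PySem.Str.pyGet?_natCast w 0
      simp only [Nat.cast_zero] at this
      rw [this, h]; rfl
    have hfirst : pvFirst w = String.ofList [ch] := by rw [pvFirst, h0]
    rw [hfirst, pvLast]
    have hm1 : PySem.Str.pyGet? (String.ofList [ch]) (-1) = some ch := by
      simp [PySem.Str.pyGet?_eq, PySem.List.pyGet?, PySem.List.pyIdx?]
    rw [hm1]

theorem pvMem_sorted2 {α κ₁ κ₂ : Type} [LT κ₁] [DecidableLT κ₁] [LT κ₂] [DecidableLT κ₂]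
    (xs : List α) (k1 : α → κ₁) (k2 : α → κ₂) (x : α)
    (hx : x ∈ PySem.List.sorted2 xs k1 k2 false) : x ∈ xs :=
  (PySem.List.sorted2_perm xs k1 k2 false).mem_iff.1 hx

-- ===== VERDICT (by name: the statement is the Claim_ definition above) =====
theorem group_and_sort_words_spec : Claim_equal_group_and_sort_words := by
  intro words _dom hpre
  unfold Spec_group_and_sort_words group_and_sort_words group_and_sort_words_alt
  simp only [PySem.List.dedup_eq_ofList, pvGroups_items words]
  set L := PySem.Set.ofList (words.map pvFirst) with hL
  -- each letter in L comes from a nonempty word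
  have hLmem : ∀ c ∈ L, ∃ w ∈ words, w ≠ "" ∧ c = pvFirst w := by
    intro c hc
    rcases List.mem_map.1 ((PySem.Set.mem_ofList (words.map pvFirst) c).1 hc) with ⟨w, hw, rfl⟩
    exact ⟨w, hw, hpre w hw, rfl⟩
  rw [pvSorted2_map (pvGpair words), pvSorted2_map (f := fun letter =>
      (letter, (((words.filter (fun word => pvFirst word == letter)).length : Int)),
        words.filter (fun word => pvFirst word == letter)))]
  rw [pvSorted2_congr
      (k1 := fun c => -((((L.map (pvGpair words)).foldl (fun d p => d.insert p.1 ((p.2.length : Int))) PySem.Dict.empty)).getD (pvGpair words c).1 0))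
      (k1' := fun c => -(((words.filter (fun w => pvFirst w == c)).length : Int)))
      (k2 := fun c => pvLast (pvGpair words c).1) (k2' := fun c => c)
      (xs := L)
      (fun c hc => by simp only [pvGpair]; rw [pvFreq_getD words c hc])
      (fun c hc => by
        rcases hLmem c hc with ⟨w, _, hw, rfl⟩
        simp only [pvGpair]; exact pvLast_pvFirst w hw)]
  rw [List.map_map]
  refine List.map_congr_left (fun c hc => ?_)
  have hcL : c ∈ L := pvMem_sorted2 _ _ _ c hc
  simp only [Function.comp_def, pvGpair]
  rw [pvFreq_getD words c hcL]
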